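-- pv_equiv track=rewrite | github.com/Rantonium/CodeSignal-Company-Challenges | PureStorage_1.py | longestUncorruptedSegment
-- ===== SOURCE A (Python) =====
-- def longestUncorruptedSegment(sourceArray, destinationArray):
--     max_len = 0
--     max_ind = 0
--     lenn = 0
--     ind = 0
--     for i in range(0, len(sourceArray)):
--         if (sourceArray[i] == destinationArray[i]):
--             if (lenn == 0):
--                 lenn = 1
--                 ind = i
--             else:
--                 lenn = lenn+1
--         if (sourceArray[i] != destinationArray[i] or i == len(sourceArray) - 1):
--             if (lenn > max_len):
--                 max_len = lenn
--                 max_ind = ind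
--             lenn = 0
--     return [max_len, max_ind]
-- ===== SOURCE B (Python) =====
-- def longestUncorruptedSegment(sourceArray, destinationArray):
--     # signal-then-group decomposition: boolean match list, run-length encode, scan runs
--     matches = [sourceArray[i] == destinationArray[i] for i in range(len(sourceArray))]
--     runs = []
--     for m in matches:
--         if runs and runs[-1][0] == m:
--             runs[-1] = (m, runs[-1][1] + 1)
--         else:
--             runs.append((m, 1))
--     max_len = 0
--     max_ind = 0
--     i = 0
--     for k, l in runs:
--         if k and l > max_len:
--             max_len, max_ind = l, i
--         i += l
--     return [max_len, max_ind]
-- ===== Notes on version B (the rewrite author's own statement) =====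
-- stated objective: alternative
-- what changed: A's single inline flag/counter state machine (with flush-on-mismatch-or-last-index) is replaced by a three-stage decomposition: build the boolean match signal, run-length-encode it, then scan the runs keeping the longest True run and its start offset.
import Mathlib
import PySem

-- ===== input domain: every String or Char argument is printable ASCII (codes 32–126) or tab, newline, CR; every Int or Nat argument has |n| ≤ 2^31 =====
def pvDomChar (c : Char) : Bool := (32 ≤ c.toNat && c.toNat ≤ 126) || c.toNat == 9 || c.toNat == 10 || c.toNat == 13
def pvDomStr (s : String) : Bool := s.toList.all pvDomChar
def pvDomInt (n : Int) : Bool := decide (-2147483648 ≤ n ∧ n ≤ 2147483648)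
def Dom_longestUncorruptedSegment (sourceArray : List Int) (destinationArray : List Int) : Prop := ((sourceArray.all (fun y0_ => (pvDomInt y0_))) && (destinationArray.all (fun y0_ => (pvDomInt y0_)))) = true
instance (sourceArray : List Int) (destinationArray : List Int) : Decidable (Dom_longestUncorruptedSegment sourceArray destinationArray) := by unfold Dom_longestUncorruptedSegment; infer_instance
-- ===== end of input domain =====

-- B replaces A's inline flag/counter state machine by a three-stage decomposition
-- (boolean match signal, run-length encoding, scan of the runs); objective: alternative/simpler.

-- ===== PORT A =====
-- one iteration of A's for-loop; indexing out of range (Python IndexError, reachable only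
-- when destinationArray is shorter than sourceArray) is excluded by Pre_, so the 0 default never fires there
def lusStepA (src dst : List Int) (st : Int × Int × Int × Int) (i : Int) : Int × Int × Int × Int :=
  let s := PySem.List.pyGetD src i 0
  let d := PySem.List.pyGetD dst i 0
  let maxL := st.1
  let maxI := st.2.1
  let lenn0 := st.2.2.1
  let ind0 := st.2.2.2
  let lenn := if s = d then (if lenn0 = 0 then 1 else lenn0 + 1) else lenn0
  let ind := if s = d then (if lenn0 = 0 then i else ind0) else ind0
  if s ≠ d ∨ i = (src.length : Int) - 1 then
    if lenn > maxL then (lenn, ind, 0, ind) else (maxL, maxI, 0, ind)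
  else (maxL, maxI, lenn, ind)

def longestUncorruptedSegment (sourceArray : List Int) (destinationArray : List Int) : List Int :=
  let st := (PySem.List.pyRange 0 (sourceArray.length : Int)).foldl
      (lusStepA sourceArray destinationArray) (0, 0, 0, 0)
  [st.1, st.2.1]

-- ===== PORT B =====
-- Source B's per-index comparison sourceArray[i] == destinationArray[i]
def lusMatch (src dst : List Int) (i : Int) : Bool :=
  decide (PySem.List.pyGetD src i 0 = PySem.List.pyGetD dst i 0)

-- port of Source B's 'if runs and runs[-1][0] == m: bump last count else append (m, 1)'
def lusRleAdd : List (Bool × Int) → Bool → List (Bool × Int)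
  | [], m => [(m, 1)]
  | [(k, l)], m => if k = m then [(k, l + 1)] else [(k, l), (m, 1)]
  | p :: q :: rest, m => p :: lusRleAdd (q :: rest) m

-- one iteration of Source B's scan of the runs: acc = (max_len, max_ind, i)
def lusScanStep (acc : Int × Int × Int) (g : Bool × Int) : Int × Int × Int :=
  let maxL := if g.1 ∧ g.2 > acc.1 then g.2 else acc.1
  let maxI := if g.1 ∧ g.2 > acc.1 then acc.2.2 else acc.2.1
  (maxL, maxI, acc.2.2 + g.2)

def longestUncorruptedSegment_alt (sourceArray : List Int) (destinationArray : List Int) : List Int :=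
  let ms := (PySem.List.pyRange 0 (sourceArray.length : Int)).map
      (lusMatch sourceArray destinationArray)
  let runs := ms.foldl lusRleAdd []
  let res := runs.foldl lusScanStep (0, 0, 0)
  [res.1, res.2.1]

-- ===== PRECONDITION & SPEC =====
-- Pre_ excludes exactly the inputs where A raises IndexError (destinationArray shorter than
-- sourceArray: the loop indexes destinationArray[i] for every i < len(sourceArray)).
def Pre_longestUncorruptedSegment (sourceArray : List Int) (destinationArray : List Int) : Prop :=
  sourceArray.length ≤ destinationArray.length
instance (sourceArray : List Int) (destinationArray : List Int) : Decidable (Pre_longestUncorruptedSegment sourceArray destinationArray) := by unfold Pre_longestUncorruptedSegment; infer_instance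

def pvWitness_longestUncorruptedSegment : List Int × List Int := ([1, 2, 3], [1, 2, 4])

def Spec_longestUncorruptedSegment (sourceArray : List Int) (destinationArray : List Int) (out : List Int) : Prop := out = longestUncorruptedSegment_alt sourceArray destinationArray
instance (sourceArray : List Int) (destinationArray : List Int) (out : List Int) : Decidable (Spec_longestUncorruptedSegment sourceArray destinationArray out) := by unfold Spec_longestUncorruptedSegment; infer_instance

-- ===== CLAIM (what is proved, stated in full; the proofs are below) =====
def Claim_equal_longestUncorruptedSegment : Prop := ∀ (sourceArray : List Int) (destinationArray : List Int), Dom_longestUncorruptedSegment sourceArray destinationArray → Pre_longestUncorruptedSegment sourceArray destinationArray → Spec_longestUncorruptedSegment sourceArray destinationArray (longestUncorruptedSegment sourceArray destinationArray)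

-- ===== LEMMAS AND PROOFS =====

-- the match signal of the remaining source elements, starting at index i
def lusMF (dst : List Int) : List Int → Int → List Bool
  | [], _ => []
  | s :: rest, i => decide (s = PySem.List.pyGetD dst i 0) :: lusMF dst rest (i + 1)

-- prepend a run (k, l) to a run-length encoding, merging with an equal-keyed head
def lusMerge (k : Bool) (l : Int) : List (Bool × Int) → List (Bool × Int)
  | (k', l') :: gs => if k' = k then (k, l + l') :: gs else (k, l) :: (k', l') :: gs
  | [] => [(k, l)]

-- back-to-front run-length encoding (proof-side normal form of Source B's front-building loop)
def lusRLE : List Bool → List (Bool × Int)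
  | [] => []
  | m :: t => lusMerge m 1 (lusRLE t)

-- recursion-form of Source B's scan of the runs
def lusScan : List (Bool × Int) → Int → Int × Int → Int × Int
  | [], _, acc => acc
  | (k, l) :: gs, i, acc => lusScan gs (i + l) (if k ∧ l > acc.1 then (l, i) else acc)

def lusView (st : Int × Int × Int × Int) : Int × Int := (st.1, st.2.1)

theorem lusScan_foldl (gs : List (Bool × Int)) : ∀ (mL mI i : Int),
    ((gs.foldl lusScanStep (mL, mI, i)).1, (gs.foldl lusScanStep (mL, mI, i)).2.1)
      = lusScan gs i (mL, mI) := by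
  induction gs with
  | nil => intro mL mI i; rfl
  | cons g gs ih =>
    intro mL mI i
    obtain ⟨k, l⟩ := g
    simp only [List.foldl_cons, lusScanStep, lusScan]
    by_cases h : k ∧ l > mL
    · simp only [if_pos h]; exact ih l i (i + l)
    · simp only [if_neg h]; exact ih mL mI (i + l)

theorem lusMerge_same (k : Bool) (l l' : Int) (g : List (Bool × Int)) :
    lusMerge k l (lusMerge k l' g) = lusMerge k (l + l') g := by
  cases g with
  | nil => simp [lusMerge, add_assoc]
  | cons p gs =>
    obtain ⟨k', l''⟩ := p
    by_cases h : k' = k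
    · subst h; simp [lusMerge, add_assoc]
    · simp [lusMerge, h]

theorem lusMerge_ne (k m : Bool) (hne : k ≠ m) (l l' : Int) (g : List (Bool × Int)) :
    lusMerge k l (lusMerge m l' g) = (k, l) :: lusMerge m l' g := by
  cases g with
  | nil => simp [lusMerge, Ne.symm hne]
  | cons p gs =>
    obtain ⟨k', l''⟩ := p
    by_cases h : k' = m
    · subst h; simp [lusMerge, Ne.symm hne]
    · simp [lusMerge, h, Ne.symm hne]

theorem lusRleAdd_append (rs : List (Bool × Int)) (k : Bool) (l : Int) (m : Bool) :
    lusRleAdd (rs ++ [(k, l)]) m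
      = if k = m then rs ++ [(k, l + 1)] else rs ++ [(k, l), (m, 1)] := by
  induction rs with
  | nil => simp [lusRleAdd]
  | cons p rs ih =>
    rw [List.cons_append]
    cases hrs : rs ++ [(k, l)] with
    | nil => simp at hrs
    | cons q t =>
      rw [show lusRleAdd (p :: q :: t) m = p :: lusRleAdd (q :: t) m by simp [lusRleAdd], ← hrs,
        ih]
      by_cases h : k = m <;> simp [h]

theorem lusRleAdd_fold_append (t : List Bool) : ∀ (rs : List (Bool × Int)) (k : Bool) (l : Int),
    t.foldl lusRleAdd (rs ++ [(k, l)]) = rs ++ lusMerge k l (lusRLE t) := by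
  induction t with
  | nil => intro rs k l; simp [lusRLE, lusMerge]
  | cons m t ih =>
    intro rs k l
    simp only [List.foldl_cons, lusRleAdd_append, lusRLE]
    by_cases h : k = m
    · subst h
      rw [if_pos rfl, ih, lusMerge_same]
    · rw [if_neg h]
      have h2 : rs ++ [(k, l), (m, 1)] = (rs ++ [(k, l)]) ++ [(m, 1)] := by simp
      rw [h2, ih, lusMerge_ne k m h, List.append_assoc]
      rfl

theorem lusRleAdd_fold (ms : List Bool) : ms.foldl lusRleAdd [] = lusRLE ms := by
  cases ms with
  | nil => rfl
  | cons m t =>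
    have h0 : ([] : List (Bool × Int)) ++ [(m, 1)] = [(m, 1)] := rfl
    simp only [List.foldl_cons, lusRleAdd, lusRLE]
    rw [← h0, lusRleAdd_fold_append]
    rfl

theorem lusMatches_bridge (dst : List Int) : ∀ (xs pre : List Int),
    (PySem.List.pyRange (pre.length : Int) (((pre ++ xs).length : Nat) : Int)).map
      (lusMatch (pre ++ xs) dst)
      = lusMF dst xs (pre.length : Int) := by
  intro xs
  induction xs with
  | nil =>
    intro pre
    rw [PySem.List.pyRange_one_eq_nil (by simp)]
    rfl
  | cons s rest ih =>
    intro pre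
    have hlt : (pre.length : Int) < ((pre ++ s :: rest).length : Nat) := by
      simp only [List.length_append, List.length_cons]; push_cast; omega
    rw [PySem.List.pyRange_one_cons hlt, List.map_cons]
    have hs : PySem.List.pyGetD (pre ++ s :: rest) (pre.length : Int) 0 = s := by
      rw [PySem.List.pyGetD_natCast]
      simp [List.getD]
    have happ : pre ++ s :: rest = (pre ++ [s]) ++ rest := by simp
    have hlen1 : (pre.length : Int) + 1 = ((pre ++ [s]).length : Int) := by simp
    rw [show lusMatch (pre ++ s :: rest) dst (pre.length : Int)
        = decide (s = PySem.List.pyGetD dst (pre.length : Int) 0) by simp [lusMatch, hs], lusMF,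
      hlen1]
    congr 1
    rw [happ]
    exact ih (pre ++ [s])

-- scanning a run-length encoding headed by a false run just advances the offset
theorem lusScan_merge_false (g : List (Bool × Int)) (l i : Int) (acc : Int × Int) :
    lusScan (lusMerge false l g) i acc = lusScan g (i + l) acc := by
  cases g with
  | nil => simp [lusMerge, lusScan]
  | cons p gs =>
    obtain ⟨k', l'⟩ := p
    cases k' with
    | false => simp [lusMerge, lusScan, add_assoc]
    | true => simp [lusMerge, lusScan]

-- evaluation form of one loop step (both array reads named)
theorem lusStepA_eq (src dst : List Int) (maxL maxI lenn0 ind0 i s d : Int)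
    (hs : PySem.List.pyGetD src i 0 = s) (hd : PySem.List.pyGetD dst i 0 = d) :
    lusStepA src dst (maxL, maxI, lenn0, ind0) i =
      (let lenn := if s = d then (if lenn0 = 0 then 1 else lenn0 + 1) else lenn0
       let ind := if s = d then (if lenn0 = 0 then i else ind0) else ind0
       if s ≠ d ∨ i = (src.length : Int) - 1 then
         if lenn > maxL then (lenn, ind, 0, ind) else (maxL, maxI, 0, ind)
       else (maxL, maxI, lenn, ind)) := by
  simp only [lusStepA, hs, hd]

-- MAIN INVARIANT. With src = pre ++ xs and i = pre.length:
--  (P) from a state with lenn = 0, finishing A's loop computes the run scan of the remaining signal;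
--  (Q) from a state with an open run of length lenn started at ind (so ind + lenn = i), it computes
--      the run scan with that open run merged onto the front of the remaining signal's encoding.
theorem lusMain (dst : List Int) : ∀ (xs pre : List Int) (maxL maxI lenn ind : Int),
    0 ≤ maxL →
    ((lenn = 0 →
      lusView ((PySem.List.pyRange (pre.length : Int) (((pre ++ xs).length : Nat) : Int)).foldl
          (lusStepA (pre ++ xs) dst) (maxL, maxI, lenn, ind))
        = lusScan (lusRLE (lusMF dst xs (pre.length : Int))) (pre.length : Int) (maxL, maxI))
    ∧ (0 < lenn → ind + lenn = (pre.length : Int) → xs ≠ [] →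
      lusView ((PySem.List.pyRange (pre.length : Int) (((pre ++ xs).length : Nat) : Int)).foldl
          (lusStepA (pre ++ xs) dst) (maxL, maxI, lenn, ind))
        = lusScan (lusMerge true lenn (lusRLE (lusMF dst xs (pre.length : Int)))) ind (maxL, maxI))) := by
  intro xs
  induction xs with
  | nil =>
    intro pre maxL maxI lenn ind _h0
    constructor
    · intro _
      rw [PySem.List.pyRange_one_eq_nil (by simp)]
      rfl
    · intro _ _ hne; exact absurd rfl hne
  | cons s rest ih =>
    intro pre maxL maxI lenn ind h0
    have hlt : (pre.length : Int) < ((pre ++ s :: rest).length : Nat) := by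
      simp only [List.length_append, List.length_cons]; push_cast; omega
    have happ : pre ++ s :: rest = (pre ++ [s]) ++ rest := by simp
    have hlen1 : (pre.length : Int) + 1 = ((pre ++ [s]).length : Int) := by simp
    have hs : PySem.List.pyGetD (pre ++ s :: rest) (pre.length : Int) 0 = s := by
      rw [PySem.List.pyGetD_natCast]; simp [List.getD]
    have hlast : ((pre.length : Int) = ((pre ++ s :: rest).length : Nat) - 1) ↔ rest = [] := by
      rcases rest with _ | ⟨r, rest⟩
      · simp only [List.length_append, List.length_cons, List.length_nil]
        push_cast
        constructor
        · intro _; trivial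
        · intro _; omega
      · simp only [List.length_append, List.length_cons]
        push_cast
        constructor
        · intro h; exfalso; omega
        · intro h; exact absurd h (by simp)
    constructor
    -- ===== (P): lenn = 0 =====
    · intro hlz
      subst hlz
      rw [PySem.List.pyRange_one_cons hlt, List.foldl_cons,
        lusStepA_eq _ dst maxL maxI 0 ind _ s (PySem.List.pyGetD dst (pre.length : Int) 0) hs rfl]
      simp only [lusMF, lusRLE]
      by_cases hm : s = PySem.List.pyGetD dst (pre.length : Int) 0
      · rcases Decidable.em (rest = []) with hr | hr
        · -- match at the last element: open a run of length 1 and flush it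
          subst hr
          rw [PySem.List.pyRange_one_eq_nil (by simp)]
          have hL : (pre.length : Int) = ((pre ++ [s]).length : Int) - 1 := hlast.mpr rfl
          rw [if_pos (Or.inr hL)]
          simp only [List.foldl_nil, ← hm, eq_self_iff_true, if_true, ite_true, decide_true,
            lusMerge, lusScan, lusView, true_and]
          by_cases h1 : (1 : Int) > maxL
          · simp [h1, lusMF, lusRLE, lusMerge, lusScan]
          · simp [h1, lusMF, lusRLE, lusMerge, lusScan]
        · -- match, not last: continue with the open run via (Q)
          have hni : ¬ ((pre.length : Int) = ((pre ++ s :: rest).length : Nat) - 1) :=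
            fun hc => hr (hlast.mp hc)
          rw [if_neg (by push_neg; exact ⟨hm, hni⟩)]
          simp only [← hm, eq_self_iff_true, if_true, ite_true, decide_true]
          have hq := (ih (pre ++ [s]) maxL maxI 1 (pre.length : Int) h0).2
              (by norm_num) (by omega) hr
          rw [happ, hlen1]
          exact hq
      · -- mismatch with lenn = 0: flush does nothing (0 ≤ maxL)
        rw [if_pos (Or.inl hm)]
        simp only [if_neg hm, decide_eq_false hm]
        rw [if_neg (by omega : ¬ ((0 : Int) > maxL))]
        rw [lusScan_merge_false]
        have hp := (ih (pre ++ [s]) maxL maxI 0 ind h0).1 rfl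
        rw [happ, hlen1]
        exact hp
    -- ===== (Q): open run lenn > 0 started at ind =====
    · intro hlp hind _hne
      have hlnz : ¬ (lenn = 0) := by omega
      rw [PySem.List.pyRange_one_cons hlt, List.foldl_cons,
        lusStepA_eq _ dst maxL maxI lenn ind _ s (PySem.List.pyGetD dst (pre.length : Int) 0) hs
          rfl]
      simp only [lusMF, lusRLE, if_neg hlnz]
      by_cases hm : s = PySem.List.pyGetD dst (pre.length : Int) 0
      · rcases Decidable.em (rest = []) with hr | hr
        · -- match at the last element: extend the run to lenn + 1 and flush it at ind
          subst hr
          rw [PySem.List.pyRange_one_eq_nil (by simp)]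
          have hL : (pre.length : Int) = ((pre ++ [s]).length : Int) - 1 := hlast.mpr rfl
          rw [if_pos (Or.inr hL)]
          simp only [List.foldl_nil, ← hm, eq_self_iff_true, if_true, ite_true, decide_true]
          rw [lusMerge_same]
          simp only [lusMerge, lusScan, lusView, true_and]
          by_cases h1 : lenn + 1 > maxL
          · simp [h1, lusMF, lusRLE, lusMerge, lusScan, lusView]
          · simp [h1, lusMF, lusRLE, lusMerge, lusScan, lusView]
        · -- match, not last: extend the open run and recurse with (Q)
          have hni : ¬ ((pre.length : Int) = ((pre ++ s :: rest).length : Nat) - 1) :=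
            fun hc => hr (hlast.mp hc)
          rw [if_neg (by push_neg; exact ⟨hm, hni⟩)]
          simp only [← hm, eq_self_iff_true, if_true, ite_true, decide_true]
          rw [lusMerge_same]
          have hq := (ih (pre ++ [s]) maxL maxI (lenn + 1) ind h0).2
              (by omega) (by rw [← hlen1]; omega) hr
          rw [happ, hlen1]
          exact hq
      · -- mismatch: flush the open run, then continue with (P)
        rw [if_pos (Or.inl hm)]
        simp only [if_neg hm, decide_eq_false hm]
        rw [lusMerge_ne true false (by simp) lenn 1]
        simp only [lusScan]
        rw [hind, lusScan_merge_false]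
        rcases Decidable.em (lenn > maxL) with hgt | hgt
        · rw [if_pos hgt, if_pos (by exact ⟨trivial, hgt⟩)]
          have hp := (ih (pre ++ [s]) lenn ind 0 ind (by omega)).1 rfl
          rw [happ, hlen1]
          exact hp
        · rw [if_neg hgt, if_neg (by intro hc; exact hgt hc.2)]
          have hp := (ih (pre ++ [s]) maxL maxI 0 ind h0).1 rfl
          rw [happ, hlen1]
          exact hp

-- ===== VERDICT (by name: the statement is the Claim_ definition above) =====
theorem longestUncorruptedSegment_spec : Claim_equal_longestUncorruptedSegment := by
  intro src dst _hdom _hpre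
  unfold Spec_longestUncorruptedSegment
  simp only [longestUncorruptedSegment, longestUncorruptedSegment_alt]
  have h1 := (lusMain dst src [] 0 0 0 0 le_rfl).1 rfl
  have hm := lusMatches_bridge dst src []
  simp only [List.nil_append, List.length_nil, Nat.cast_zero] at h1 hm
  have key : lusView ((PySem.List.pyRange 0 (src.length : Int)).foldl (lusStepA src dst) (0, 0, 0, 0))
      = (((((PySem.List.pyRange 0 (src.length : Int)).map (lusMatch src dst)).foldl
            lusRleAdd []).foldl lusScanStep (0, 0, 0)).1,
         ((((PySem.List.pyRange 0 (src.length : Int)).map (lusMatch src dst)).foldl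
            lusRleAdd []).foldl lusScanStep (0, 0, 0)).2.1) := by
    rw [lusScan_foldl, lusRleAdd_fold, hm]
    exact h1
  have e1 := congrArg Prod.fst key
  have e2 := congrArg Prod.snd key
  simp only [lusView] at e1 e2
  rw [e1, e2]
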